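-- pv_equiv track=rewrite | github.com/cyberdudebivash/CYBERDUDEBIVASH-THREAT-INTEL-PLATFORM | agent/v33_fusion/detections/detection_forge.py | _gen_kql_query
-- ===== SOURCE A (Python) =====
-- from typing import Dict, List, Optional
--
-- def _gen_kql_query(title: str, ips: List, domains: List, hashes: List) -> str:
--     parts = []
--     comment = f"// CDB APEX v33.0 — {title[:80]}\n"
--
--     if ips:
--         ip_list = ", ".join(f'"{ip}"' for ip in ips[:15])
--         parts.append(f"DeviceNetworkEvents\n| where RemoteIP in ({ip_list})")
--
--     if domains:
--         domain_list = ", ".join(f'"{d}"' for d in domains[:15])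
--         parts.append(f"DeviceNetworkEvents\n| where RemoteUrl has_any ({domain_list})")
--
--     if hashes:
--         hash_list = ", ".join(f'"{h}"' for h in hashes[:15] if len(h) == 64)
--         if hash_list:
--             parts.append(f"DeviceFileEvents\n| where SHA256 in ({hash_list})")
--
--     return comment + "\n\n// OR\n\n".join(parts) if parts else comment + "// No actionable IOCs for KQL"
-- ===== SOURCE B (Python) =====
-- def _gen_kql_query(title, ips, domains, hashes):
--     def quoted(items, limit, keep):
--         # recursively build '"a", "b", ...' from at most `limit` items, skipping rejected ones
--         if limit == 0 or not items:
--             return ""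
--         rest = quoted(items[1:], limit - 1, keep)
--         if not keep(items[0]):
--             return rest
--         q = '"' + items[0] + '"'
--         return q + ", " + rest if rest else q
--
--     def render(specs):
--         # recursively emit the clauses, inserting the separator only between two non-empty sides
--         if not specs:
--             return ""
--         prefix, items, keep = specs[0]
--         q = quoted(items, 15, keep)
--         head = prefix + q + ")" if q else ""
--         tail = render(specs[1:])
--         if head and tail:
--             return head + "\n\n// OR\n\n" + tail
--         return head or tail
--
--     body = render([
--         ("DeviceNetworkEvents\n| where RemoteIP in (", ips, lambda x: True),
--         ("DeviceNetworkEvents\n| where RemoteUrl has_any (", domains, lambda x: True),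
--         ("DeviceFileEvents\n| where SHA256 in (", hashes, lambda h: len(h) == 64),
--     ])
--     return "// CDB APEX v33.0 — " + title[:80] + "\n" + (body or "// No actionable IOCs for KQL")
-- ===== Notes on version B (the rewrite author's own statement) =====
-- stated objective: alternative
-- what changed: Instead of slicing, filtering, mapping and joining lists and collecting a parts list that is joined at the end, B builds each quoted IOC string by a single structural recursion with a decrementing limit counter (no slice, no filter, no join) and emits the final body by a recursion over the clauses that inserts the OR separator only between two non-empty sides (no parts list, no join).
import Mathlib
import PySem

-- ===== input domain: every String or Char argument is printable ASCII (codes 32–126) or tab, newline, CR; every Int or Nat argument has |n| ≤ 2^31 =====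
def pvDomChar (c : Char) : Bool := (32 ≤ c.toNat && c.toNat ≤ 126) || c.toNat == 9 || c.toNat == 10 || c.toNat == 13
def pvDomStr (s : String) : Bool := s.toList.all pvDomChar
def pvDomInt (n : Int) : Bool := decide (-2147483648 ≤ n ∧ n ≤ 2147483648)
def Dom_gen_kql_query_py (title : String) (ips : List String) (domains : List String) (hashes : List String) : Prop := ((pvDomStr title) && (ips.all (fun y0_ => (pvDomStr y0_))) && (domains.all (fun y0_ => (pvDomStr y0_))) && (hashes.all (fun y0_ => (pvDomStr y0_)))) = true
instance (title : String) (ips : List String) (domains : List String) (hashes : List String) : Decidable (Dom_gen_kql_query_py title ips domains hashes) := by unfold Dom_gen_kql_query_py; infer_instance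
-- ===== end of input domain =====

-- B replaces A's slice/filter/join pipelines and parts list by direct structural recursions
-- (a limit-counting quoter and a separator-aware clause renderer): an alternative decomposition, same cost.

-- ===== PORT A =====
-- f'"{x}"' in A
def pvQuote (s : String) : String := "\"" ++ s ++ "\""

def gen_kql_query_py (title : String) (ips : List String) (domains : List String) (hashes : List String) : String :=
  let comment := "// CDB APEX v33.0 — " ++ PySem.Str.slice title none (some 80) ++ "\n"
  let parts : List String := []
  let parts :=
    if ips ≠ [] then
      let ip_list := PySem.Str.join ", " ((PySem.List.slice ips none (some 15)).map pvQuote)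
      parts ++ ["DeviceNetworkEvents\n| where RemoteIP in (" ++ ip_list ++ ")"]
    else parts
  let parts :=
    if domains ≠ [] then
      let domain_list := PySem.Str.join ", " ((PySem.List.slice domains none (some 15)).map pvQuote)
      parts ++ ["DeviceNetworkEvents\n| where RemoteUrl has_any (" ++ domain_list ++ ")"]
    else parts
  let parts :=
    if hashes ≠ [] then
      let hash_list := PySem.Str.join ", " (((PySem.List.slice hashes none (some 15)).filter (fun h => PySem.Str.len h == 64)).map pvQuote)
      if hash_list ≠ "" then
        parts ++ ["DeviceFileEvents\n| where SHA256 in (" ++ hash_list ++ ")"]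
      else parts
    else parts
  if parts ≠ [] then comment ++ PySem.Str.join "\n\n// OR\n\n" parts
  else comment ++ "// No actionable IOCs for KQL"

-- ===== PORT B =====
-- quoted(items, limit, keep): recursion with a decrementing limit counter
def pvQuoted : List String → Nat → (String → Bool) → String
  | _, 0, _ => ""
  | [], _ + 1, _ => ""
  | x :: xs, n + 1, keep =>
    let rest := pvQuoted xs n keep
    if !keep x then rest
    else
      let q := "\"" ++ x ++ "\""
      if rest ≠ "" then q ++ ", " ++ rest else q

-- render(specs): recursion over the clause specs, separator only between two non-empty sides
def pvRender : List (String × List String × (String → Bool)) → String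
  | [] => ""
  | s :: specs =>
    let q := pvQuoted s.2.1 15 s.2.2
    let head := if q ≠ "" then s.1 ++ q ++ ")" else ""
    let tail := pvRender specs
    if head ≠ "" ∧ tail ≠ "" then head ++ "\n\n// OR\n\n" ++ tail
    else if head ≠ "" then head else tail

def gen_kql_query_py_alt (title : String) (ips : List String) (domains : List String) (hashes : List String) : String :=
  let body := pvRender
    [("DeviceNetworkEvents\n| where RemoteIP in (", ips, fun _ => true),
     ("DeviceNetworkEvents\n| where RemoteUrl has_any (", domains, fun _ => true),
     ("DeviceFileEvents\n| where SHA256 in (", hashes, fun h => PySem.Str.len h == 64)]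
  "// CDB APEX v33.0 — " ++ PySem.Str.slice title none (some 80) ++ "\n" ++
    (if body ≠ "" then body else "// No actionable IOCs for KQL")

-- ===== PRECONDITION & SPEC =====
def Spec_gen_kql_query_py (title : String) (ips : List String) (domains : List String) (hashes : List String) (out : String) : Prop := out = gen_kql_query_py_alt title ips domains hashes
instance (title : String) (ips : List String) (domains : List String) (hashes : List String) (out : String) : Decidable (Spec_gen_kql_query_py title ips domains hashes out) := by unfold Spec_gen_kql_query_py; infer_instance

-- ===== CLAIM =====
def Claim_equal_gen_kql_query_py : Prop := ∀ (title : String) (ips : List String) (domains : List String) (hashes : List String), Dom_gen_kql_query_py title ips domains hashes → Spec_gen_kql_query_py title ips domains hashes (gen_kql_query_py title ips domains hashes)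

-- ===== LEMMAS AND PROOFS =====

-- ", ".join of quoted items is empty exactly when there are no items
lemma pv_join_quote_eq_empty_iff (l : List String) :
    (PySem.Str.join ", " (l.map pvQuote) = "") ↔ l = [] := by
  constructor
  · intro h
    cases l with
    | nil => rfl
    | cons x xs =>
      exfalso
      have := congrArg String.toList h
      cases xs <;>
        simp [pvQuote, PySem.Str.toList_join, PySem.Chars.join, List.intercalate] at this
  · rintro rfl; simp [PySem.Str.join]

-- join over a one-element list
lemma pv_join_singleton (sep a : String) : PySem.Str.join sep [a] = a := by
  apply String.toList_inj.mp
  simp [PySem.Str.toList_join, PySem.Chars.join_singleton]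

-- join over a cons of two or more strings
lemma pv_join_cons_cons (sep a b : String) (l : List String) :
    PySem.Str.join sep (a :: b :: l) = a ++ sep ++ PySem.Str.join sep (b :: l) := by
  apply String.toList_inj.mp
  simp [PySem.Str.toList_join, PySem.Chars.join_cons_cons]

lemma pv_quoted_nil (n : Nat) (p : String → Bool) : pvQuoted [] n p = "" := by
  cases n <;> rfl

-- B's recursive quoter computes exactly A's slice/filter/map/join pipeline
lemma pvQuoted_eq (p : String → Bool) : ∀ (n : Nat) (l : List String),
    pvQuoted l n p = PySem.Str.join ", " (((l.take n).filter p).map pvQuote) := by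
  intro n l
  induction l generalizing n with
  | nil => cases n <;> simp [pvQuoted, PySem.Str.join]
  | cons x xs ih =>
    cases n with
    | zero => simp [pvQuoted, PySem.Str.join]
    | succ m =>
      by_cases hp : p x
      · have htake : ((x :: xs).take (m + 1)).filter p = x :: (xs.take m).filter p := by
          simp [hp]
        cases hcons : (xs.take m).filter p with
        | nil =>
          have hrest : pvQuoted xs m p = "" := by simp [ih, hcons, PySem.Str.join]
          rw [htake, hcons, List.map_cons, List.map_nil, pv_join_singleton]
          simp [pvQuoted, hp, hrest, pvQuote]
        | cons y ys =>
          have hval : pvQuoted xs m p = PySem.Str.join ", " ((y :: ys).map pvQuote) := by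
            rw [ih, hcons]
          have hne : pvQuoted xs m p ≠ "" := by
            rw [hval, ne_eq, pv_join_quote_eq_empty_iff]; simp
          rw [htake, hcons, List.map_cons, List.map_cons, pv_join_cons_cons, ← List.map_cons,
            ← hval]
          simp [pvQuoted, hp, hne, pvQuote]
      · simp [pvQuoted, hp, ih]

lemma pv_main (title : String) (ips : List String) (domains : List String) (hashes : List String) :
    gen_kql_query_py title ips domains hashes = gen_kql_query_py_alt title ips domains hashes := by
  have hslice : ∀ m : List String, PySem.List.slice m none (some 15) = m.take 15 := by
    intro m; simpa using PySem.List.slice_to (xs := m) (b := 15) (by norm_num)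
  have e1 : ∀ l : List String,
      PySem.Str.join ", " ((PySem.List.slice l none (some 15)).map pvQuote)
        = pvQuoted l 15 (fun _ => true) := by
    intro l; rw [pvQuoted_eq, hslice, List.filter_true]
  have e3 : PySem.Str.join ", " (((PySem.List.slice hashes none (some 15)).filter
        (fun h => PySem.Str.len h == 64)).map pvQuote)
        = pvQuoted hashes 15 (fun h => PySem.Str.len h == 64) := by
    rw [pvQuoted_eq, hslice]
  have n1 : ∀ l : List String, (pvQuoted l 15 (fun _ => true) = "") ↔ l = [] := by
    intro l
    rw [pvQuoted_eq, pv_join_quote_eq_empty_iff, List.filter_true, List.take_eq_nil_iff]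
    simp
  unfold gen_kql_query_py gen_kql_query_py_alt
  simp only [pvRender, e1, e3]
  by_cases h1 : pvQuoted ips 15 (fun _ => true) = "" <;>
    by_cases h2 : pvQuoted domains 15 (fun _ => true) = "" <;>
      by_cases h3 : pvQuoted hashes 15 (fun h => PySem.Str.len h == 64) = ""
  all_goals
    first
    | (have hi : ips = [] := (n1 ips).mp h1) | (have hi : ips ≠ [] := fun he => h1 ((n1 ips).mpr he))
  all_goals
    first
    | (have hd : domains = [] := (n1 domains).mp h2)
    | (have hd : domains ≠ [] := fun he => h2 ((n1 domains).mpr he))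
  all_goals try simp only [PySem.Str.len_eq, String.length_toList] at h3
  all_goals
    first
    | (have hhe : hashes ≠ [] := fun he => h3 (by rw [he, pv_quoted_nil])
       simp [hi, hd, h1, h2, h3, hhe, pv_quoted_nil, pv_join_singleton, pv_join_cons_cons])
    | simp [hi, hd, h1, h2, h3, pv_quoted_nil, pv_join_singleton, pv_join_cons_cons]

-- ===== VERDICT =====
theorem gen_kql_query_py_spec : Claim_equal_gen_kql_query_py := by
  intro title ips domains hashes _
  unfold Spec_gen_kql_query_py
  exact pv_main title ips domains hashes
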